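-- pv_equiv track=rewrite | github.com/masthom/Music-History-Knowledge-Graph | MergeJasonToTtl5.py | ensure_correct_punctuation
-- ===== SOURCE A (Python) =====
-- def ensure_correct_punctuation(lines):
--     """Stellt korrekte TTL-Zeichensetzung sicher"""
--     if not lines:
--         return lines
--
--     # Finde alle nicht-Kommentar, nicht-leere Zeilen
--     content_lines = []
--     for i, line in enumerate(lines):
--         stripped = line.strip()
--         if stripped and not stripped.startswith('#'):
--             content_lines.append(i)
--
--     if not content_lines:
--         return lines
--
--     result = lines.copy()
--
--     # Alle Inhaltszeilen (außer der letzten) mit Semikolon beenden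
--     for i in content_lines[:-1]:
--         line = result[i].rstrip()
--         if not line.endswith(';') and not line.endswith(','):
--             result[i] = line + ' ;'
--
--     # Letzte Inhaltszeile mit Punkt beenden (nur wenn nicht schon vorhanden)
--     last_idx = content_lines[-1]
--     last_line = result[last_idx].rstrip()
--     if not last_line.endswith('.'):
--         # Entferne eventuelles Semikolon am Ende
--         last_line = last_line.rstrip(';')
--         result[last_idx] = last_line + ' .'
--
--     return result
-- ===== SOURCE B (Python) =====
-- def _is_content(line):
--     stripped = line.strip()
--     return bool(stripped) and not stripped.startswith('#')
--
--
-- def _fix_mid(line):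
--     t = line.rstrip()
--     if t.endswith(';') or t.endswith(','):
--         return line
--     return t + ' ;'
--
--
-- def _fix_last(line):
--     t = line.rstrip()
--     if t.endswith('.'):
--         return line
--     return t.rstrip(';') + ' .'
--
--
-- def ensure_correct_punctuation(lines):
--     """Stellt korrekte TTL-Zeichensetzung sicher"""
--     out = []
--     seen_last = False
--     for line in reversed(lines):
--         if not _is_content(line):
--             out.append(line)
--         elif seen_last:
--             out.append(_fix_mid(line))
--         else:
--             out.append(_fix_last(line))
--             seen_last = True
--     return out[::-1] if seen_last else lines
-- ===== Notes on version B (the rewrite author's own statement) =====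
-- stated objective: alternative
-- what changed: Instead of first collecting the list of content-line indices and then patching the list in place in two passes, B makes a single reverse traversal with a seen-last flag, fixing the last content line with the period rule when first met and every earlier content line with the semicolon rule.
import Mathlib
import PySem

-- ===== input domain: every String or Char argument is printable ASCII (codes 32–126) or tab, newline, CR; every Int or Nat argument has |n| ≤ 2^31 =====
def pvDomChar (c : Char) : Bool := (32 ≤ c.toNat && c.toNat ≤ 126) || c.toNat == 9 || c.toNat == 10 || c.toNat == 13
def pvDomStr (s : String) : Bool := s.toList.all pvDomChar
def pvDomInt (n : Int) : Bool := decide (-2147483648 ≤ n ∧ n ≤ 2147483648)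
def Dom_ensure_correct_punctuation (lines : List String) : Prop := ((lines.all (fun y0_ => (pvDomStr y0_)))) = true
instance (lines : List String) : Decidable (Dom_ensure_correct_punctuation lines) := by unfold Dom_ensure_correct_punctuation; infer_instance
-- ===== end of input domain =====

-- B replaces A's two-pass index-list patching by a single reverse traversal with a seen-last flag (alternative decomposition, same cost).

-- hand port of Python's str.rstrip(';') (strip set = {';'}): removes all trailing ';' characters; exact
def pvRstripSemi (s : String) : String :=
  String.ofList ((s.toList.reverse.dropWhile (fun c => c == ';')).reverse)

-- ===== PORT A =====
def ensure_correct_punctuation (lines : List String) : List String :=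
  if lines = [] then lines
  else
    let content_lines : List Int :=
      (PySem.List.enumerate lines).foldl (fun acc p =>
        let stripped := PySem.Str.strip p.2
        if (stripped != "") && !(PySem.Str.startswith stripped "#") then acc ++ [p.1] else acc) []
    if content_lines = [] then lines
    else
      let result := lines
      let result :=
        (PySem.List.slice content_lines none (some (-1))).foldl (fun r i =>
          -- r[i]: i stems from enumerate, hence 0 ≤ i < len r; pyGetD/pySetD are exact there
          let line := PySem.Str.rstrip (PySem.List.pyGetD r i "")
          if !(PySem.Str.endswith line ";") && !(PySem.Str.endswith line ",") then
            PySem.List.pySetD r i (line ++ " ;")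
          else r) result
      let last_idx := PySem.List.pyGetD content_lines (-1) (0 : Int)
      let last_line := PySem.Str.rstrip (PySem.List.pyGetD result last_idx "")
      if !(PySem.Str.endswith last_line ".") then
        PySem.List.pySetD result last_idx (pvRstripSemi last_line ++ " .")
      else result

-- ===== PORT B =====
def pvIsContent (line : String) : Bool :=
  let stripped := PySem.Str.strip line
  (stripped != "") && !(PySem.Str.startswith stripped "#")

def pvFixMid (line : String) : String :=
  let t := PySem.Str.rstrip line
  if PySem.Str.endswith t ";" || PySem.Str.endswith t "," then line else t ++ " ;"

def pvFixLast (line : String) : String :=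
  let t := PySem.Str.rstrip line
  if PySem.Str.endswith t "." then line else pvRstripSemi t ++ " ."

def ensure_correct_punctuation_alt (lines : List String) : List String :=
  let r := lines.reverse.foldl (fun (acc : List String × Bool) line =>
      if !(pvIsContent line) then (acc.1 ++ [line], acc.2)
      else if acc.2 then (acc.1 ++ [pvFixMid line], acc.2)
      else (acc.1 ++ [pvFixLast line], true)) ([], false)
  if r.2 then r.1.reverse else lines

-- ===== PRECONDITION & SPEC =====
def Spec_ensure_correct_punctuation (lines : List String) (out : List String) : Prop := out = ensure_correct_punctuation_alt lines
instance (lines : List String) (out : List String) : Decidable (Spec_ensure_correct_punctuation lines out) := by unfold Spec_ensure_correct_punctuation; infer_instance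

-- ===== CLAIM (what is proved, stated in full; the proofs are below) =====
def Claim_equal_ensure_correct_punctuation : Prop := ∀ (lines : List String), Dom_ensure_correct_punctuation lines → Spec_ensure_correct_punctuation lines (ensure_correct_punctuation lines)

-- ===== LEMMAS AND PROOFS =====

-- A's list of content-line indices, in closed form
def pvCL (lines : List String) : List Int :=
  ((PySem.List.enumerate lines).filter (fun p => pvIsContent p.2)).map Prod.fst

lemma pvCL_eq (lines : List String) :
    (PySem.List.enumerate lines).foldl (fun acc p =>
        let stripped := PySem.Str.strip p.2
        if (stripped != "") && !(PySem.Str.startswith stripped "#") then acc ++ [p.1] else acc) [] =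
      pvCL lines := by
  have h : (fun (acc : List Int) (p : Int × String) =>
        let stripped := PySem.Str.strip p.2
        if (stripped != "") && !(PySem.Str.startswith stripped "#") then acc ++ [p.1] else acc)
      = (fun (acc : List Int) (q : Int × String) => if pvIsContent q.2 then acc ++ [q.1] else acc) := rfl
  rw [h, PySem.List.foldl_append_if (p := fun q => pvIsContent q.2) (f := Prod.fst)]
  rfl

lemma pvCL_mem_iff (lines : List String) (i : Int) :
    i ∈ pvCL lines ↔ ∃ (k : Nat) (hk : k < lines.length), i = k ∧ pvIsContent lines[k] = true := by
  simp [pvCL, List.mem_filter, PySem.List.mem_enumerate_iff]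

lemma pvCL_pairwise (lines : List String) : (pvCL lines).Pairwise (· < ·) := by
  have h := PySem.List.pairwise_lt_enumerate (xs := lines) (s := 0)
  exact List.pairwise_map.mpr (h.filter _)

lemma pvCL_nil_iff (lines : List String) : pvCL lines = [] ↔ lines.any pvIsContent = false := by
  simp [pvCL, List.filter_eq_nil_iff, List.mem_iff_getElem, PySem.List.getElem_enumerate]
  aesop

-- pointwise effect of one loop body of A (the middle-lines pass)
lemma pvStepMid_getElem? (acc : List String) (i : Int) (j : Nat) (h0 : 0 ≤ i) (hib : i < (acc.length : Int)) :
    (let line := PySem.Str.rstrip (PySem.List.pyGetD acc i "")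
     if !(PySem.Str.endswith line ";") && !(PySem.Str.endswith line ",") then
       PySem.List.pySetD acc i (line ++ " ;")
     else acc)[j]? = if (j : Int) = i then acc[j]?.map pvFixMid else acc[j]? := by
  obtain ⟨k, rfl⟩ : ∃ k : Nat, i = (k : Int) := ⟨i.toNat, (Int.toNat_of_nonneg h0).symm⟩
  have hk : k < acc.length := by exact_mod_cast hib
  simp only [PySem.List.pyGetD_natCast, PySem.List.pySetD_natCast,
    List.getD_eq_getElem acc "" hk, Nat.cast_inj]
  set s := acc[k] with hs
  by_cases hj : j = k
  · subst hj
    cases h1 : PySem.Chars.endswith (PySem.Chars.rstrip s.toList) [';'] <;>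
    cases h2 : PySem.Chars.endswith (PySem.Chars.rstrip s.toList) [','] <;>
      simp [h1, h2, pvFixMid, hk, ← hs]
  · rw [if_neg hj]
    split
    · exact List.getElem?_set_ne (fun h => hj h.symm)
    · rfl

-- pointwise effect of A's final (period) step
lemma pvStepLast_getElem? (acc : List String) (i : Int) (j : Nat) (h0 : 0 ≤ i) (hib : i < (acc.length : Int)) :
    (let line := PySem.Str.rstrip (PySem.List.pyGetD acc i "")
     if !(PySem.Str.endswith line ".") then
       PySem.List.pySetD acc i (pvRstripSemi line ++ " .")
     else acc)[j]? = if (j : Int) = i then acc[j]?.map pvFixLast else acc[j]? := by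
  obtain ⟨k, rfl⟩ : ∃ k : Nat, i = (k : Int) := ⟨i.toNat, (Int.toNat_of_nonneg h0).symm⟩
  have hk : k < acc.length := by exact_mod_cast hib
  simp only [PySem.List.pyGetD_natCast, PySem.List.pySetD_natCast,
    List.getD_eq_getElem acc "" hk, Nat.cast_inj]
  set s := acc[k] with hs
  by_cases hj : j = k
  · subst hj
    cases h1 : PySem.Chars.endswith (PySem.Chars.rstrip s.toList) ['.'] <;>
      simp [h1, pvFixLast, hk, ← hs]
  · rw [if_neg hj]
    split
    · exact List.getElem?_set_ne (fun h => hj h.symm)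
    · rfl

lemma pvFoldl_set_length (step : List String → Int → List String)
    (hlen : ∀ acc i, (step acc i).length = acc.length) :
    ∀ (l : List Int) (r : List String), (l.foldl step r).length = r.length := by
  intro l
  induction l with
  | nil => intro r; rfl
  | cons i l ih => intro r; simpa [List.foldl_cons, hlen] using ih (step r i)

lemma pvFoldl_set_getElem? (step : List String → Int → List String) (g : String → String)
    (hstep : ∀ (acc : List String) (i : Int) (j : Nat), 0 ≤ i → i < (acc.length : Int) →
       (step acc i)[j]? = if (j : Int) = i then acc[j]?.map g else acc[j]?)
    (hlen : ∀ acc i, (step acc i).length = acc.length) :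
    ∀ (l : List Int) (r : List String), l.Nodup →
      (∀ i ∈ l, 0 ≤ i ∧ i < (r.length : Int)) →
      ∀ (j : Nat), (l.foldl step r)[j]? = if (j : Int) ∈ l then r[j]?.map g else r[j]? := by
  intro l
  induction l with
  | nil => intro r _ _ j; simp
  | cons i l ih =>
    intro r hn hb j
    obtain ⟨hni, hnl⟩ := List.nodup_cons.mp hn
    have hbi := hb i (List.mem_cons_self)
    have hlen' : (step r i).length = r.length := hlen r i
    have hb' : ∀ i' ∈ l, 0 ≤ i' ∧ i' < ((step r i).length : Int) := by
      rw [hlen']; exact fun i' h => hb i' (List.mem_cons_of_mem _ h)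
    rw [List.foldl_cons, ih (step r i) hnl hb' j, hstep r i j hbi.1 hbi.2]
    by_cases hj : (j : Int) ∈ l
    · have hne : ¬ ((j : Int) = i) := fun h => hni (h ▸ hj)
      simp [hj, hne]
    · by_cases hji : (j : Int) = i <;> simp [hj, hji, hni]

-- A's output, entry by entry
lemma pvA_getElem? (lines : List String) (hne : lines ≠ []) (hcl : pvCL lines ≠ []) (j : Nat) :
    (ensure_correct_punctuation lines)[j]? =
      if (j : Int) = (pvCL lines).getLast hcl then lines[j]?.map pvFixLast
      else if (j : Int) ∈ (pvCL lines).dropLast then lines[j]?.map pvFixMid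
      else lines[j]? := by
  have hnodup : (pvCL lines).Nodup := (pvCL_pairwise lines).imp (fun h => ne_of_lt h)
  have hbnd : ∀ i ∈ pvCL lines, 0 ≤ i ∧ i < (lines.length : Int) := by
    intro i hi
    obtain ⟨k, hk, rfl, -⟩ := (pvCL_mem_iff lines i).mp hi
    exact ⟨Int.natCast_nonneg k, by exact_mod_cast hk⟩
  have hlt : ∀ i ∈ (pvCL lines).dropLast, i < (pvCL lines).getLast hcl := by
    have h := pvCL_pairwise lines
    rw [← List.dropLast_append_getLast hcl] at h
    intro x hx
    exact (List.pairwise_append.mp h).2.2 x hx _ (List.mem_singleton_self _)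
  have hnotmem : (pvCL lines).getLast hcl ∉ (pvCL lines).dropLast := fun h => lt_irrefl _ (hlt _ h)
  have hlenMid : ∀ (acc : List String) (i : Int),
      ((fun (r : List String) (i : Int) =>
        let line := PySem.Str.rstrip (PySem.List.pyGetD r i "")
        if !(PySem.Str.endswith line ";") && !(PySem.Str.endswith line ",") then
          PySem.List.pySetD r i (line ++ " ;") else r) acc i).length = acc.length := by
    intro acc i; dsimp only; split <;> simp [PySem.List.length_pySetD]
  have hmain := pvFoldl_set_getElem?
    (step := fun (r : List String) (i : Int) =>
        let line := PySem.Str.rstrip (PySem.List.pyGetD r i "")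
        if !(PySem.Str.endswith line ";") && !(PySem.Str.endswith line ",") then
          PySem.List.pySetD r i (line ++ " ;") else r)
    (g := pvFixMid) pvStepMid_getElem? hlenMid (pvCL lines).dropLast lines
    (hnodup.sublist (List.dropLast_sublist _))
    (fun i hi => hbnd i (List.dropLast_sublist _ |>.mem hi))
  have hlen1 := pvFoldl_set_length _ hlenMid (pvCL lines).dropLast lines
  have hlastmem := hbnd _ (List.getLast_mem hcl)
  unfold ensure_correct_punctuation
  rw [if_neg hne, pvCL_eq, if_neg hcl, PySem.List.slice_to_neg_one,
    show PySem.List.pyGetD (pvCL lines) (-1) (0 : Int) = (pvCL lines).getLast hcl from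
      PySem.List.pyGetD_neg_one _ _ hcl]
  rw [pvStepLast_getElem? _ _ j hlastmem.1 (by rw [hlen1]; exact hlastmem.2)]
  rw [hmain j]
  by_cases hjl : (j : Int) = (pvCL lines).getLast hcl
  · rw [if_pos hjl, if_pos hjl, if_neg (hjl ▸ hnotmem)]
  · rw [if_neg hjl, if_neg hjl]

lemma pvA_length (lines : List String) :
    (ensure_correct_punctuation lines).length = lines.length := by
  have hlenMid : ∀ (acc : List String) (i : Int),
      ((fun (r : List String) (i : Int) =>
        let line := PySem.Str.rstrip (PySem.List.pyGetD r i "")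
        if !(PySem.Str.endswith line ";") && !(PySem.Str.endswith line ",") then
          PySem.List.pySetD r i (line ++ " ;") else r) acc i).length = acc.length := by
    intro acc i; dsimp only; split <;> simp [PySem.List.length_pySetD]
  by_cases hne : lines = []
  · unfold ensure_correct_punctuation; rw [if_pos hne]
  · by_cases hcl : pvCL lines = []
    · unfold ensure_correct_punctuation; rw [if_neg hne, pvCL_eq, if_pos hcl]
    · unfold ensure_correct_punctuation
      rw [if_neg hne, pvCL_eq, if_neg hcl, PySem.List.slice_to_neg_one,
        show PySem.List.pyGetD (pvCL lines) (-1) (0 : Int) = (pvCL lines).getLast hcl from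
          PySem.List.pyGetD_neg_one _ _ hcl]
      dsimp only
      split
      · rw [PySem.List.length_pySetD]; exact pvFoldl_set_length _ hlenMid _ _
      · exact pvFoldl_set_length _ hlenMid _ _

-- B's reverse sweep as a structural recursion on the reversed list
def pvGrec : List String → Bool → List String
  | [], _ => []
  | x :: xs, seen =>
    (if !(pvIsContent x) then x else if seen then pvFixMid x else pvFixLast x) ::
      pvGrec xs (seen || pvIsContent x)

lemma pvB_foldl (rl : List String) : ∀ (out : List String) (seen : Bool),
    rl.foldl (fun (acc : List String × Bool) line =>
      if !(pvIsContent line) then (acc.1 ++ [line], acc.2)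
      else if acc.2 then (acc.1 ++ [pvFixMid line], acc.2)
      else (acc.1 ++ [pvFixLast line], true)) (out, seen)
    = (out ++ pvGrec rl seen, seen || rl.any pvIsContent) := by
  induction rl with
  | nil => intro out seen; simp [pvGrec]
  | cons x xs ih =>
    intro out seen
    cases hc : pvIsContent x <;> cases seen <;>
      (rw [List.foldl_cons]
       simp only [hc, Bool.not_false, Bool.not_true, if_true, if_false,
         Bool.false_eq_true]
       rw [ih]
       simp [pvGrec, hc, List.append_assoc])

lemma pvGrec_length (rl : List String) (seen : Bool) : (pvGrec rl seen).length = rl.length := by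
  induction rl generalizing seen with
  | nil => rfl
  | cons x xs ih => simp [pvGrec, ih]

lemma pvGrec_getElem? (rl : List String) : ∀ (seen : Bool) (t : Nat) (ht : t < rl.length),
    (pvGrec rl seen)[t]? = some (
      if !(pvIsContent rl[t]) then rl[t]
      else if seen || (rl.take t).any pvIsContent then pvFixMid rl[t] else pvFixLast rl[t]) := by
  induction rl with
  | nil => intro _ t ht; simp at ht
  | cons x xs ih =>
    intro seen t ht
    cases t with
    | zero => simp [pvGrec]
    | succ t =>
      have ht' : t < xs.length := by simpa using ht
      simp [pvGrec, ih (seen || pvIsContent x) t ht', Bool.or_assoc]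

lemma pvB_eq (lines : List String) :
    ensure_correct_punctuation_alt lines =
      if lines.any pvIsContent then (pvGrec lines.reverse false).reverse else lines := by
  show (let r := lines.reverse.foldl (fun (acc : List String × Bool) line =>
      if !(pvIsContent line) then (acc.1 ++ [line], acc.2)
      else if acc.2 then (acc.1 ++ [pvFixMid line], acc.2)
      else (acc.1 ++ [pvFixLast line], true)) ([], false)
    if r.2 then r.1.reverse else lines) = _
  rw [pvB_foldl lines.reverse [] false]
  simp [List.any_reverse]

lemma pvCL_le_getLast (lines : List String) (hcl : pvCL lines ≠ []) :
    ∀ i ∈ pvCL lines, i ≤ (pvCL lines).getLast hcl := by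
  have h := pvCL_pairwise lines
  intro i hi
  rw [← List.dropLast_append_getLast hcl] at h hi
  rcases List.mem_append.mp hi with hm | hm
  · exact le_of_lt ((List.pairwise_append.mp h).2.2 i hm _ (List.mem_singleton_self _))
  · rw [List.mem_singleton.mp hm]

lemma pvDropAny_iff (lines : List String) (j : Nat) :
    (lines.drop (j+1)).any pvIsContent = true ↔
      ∃ (k : Nat) (hk : k < lines.length), j < k ∧ pvIsContent lines[k] = true := by
  simp only [List.any_eq_true, List.mem_iff_getElem, List.getElem_drop, List.length_drop]
  constructor
  · rintro ⟨x, ⟨s, hs, rfl⟩, hc⟩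
    exact ⟨j + 1 + s, by omega, by omega, hc⟩
  · rintro ⟨k, hk, hjk, hc⟩
    exact ⟨lines[k], ⟨k - (j+1), by omega, by congr 1; omega⟩, hc⟩

-- ===== VERDICT (by name: the statement is the Claim_ definition above) =====
theorem ensure_correct_punctuation_spec : Claim_equal_ensure_correct_punctuation := by
  intro lines _
  unfold Spec_ensure_correct_punctuation
  by_cases hne : lines = []
  · subst hne; rfl
  by_cases hcl : pvCL lines = []
  · rw [pvB_eq, if_neg (by simp [(pvCL_nil_iff lines).mp hcl])]
    unfold ensure_correct_punctuation
    rw [if_neg hne, pvCL_eq, if_pos hcl]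
  · have hany : lines.any pvIsContent = true := by
      cases h : lines.any pvIsContent
      · exact absurd ((pvCL_nil_iff lines).mpr h) hcl
      · rfl
    rw [pvB_eq, if_pos (by simp [hany])]
    apply List.ext_getElem?
    intro j
    by_cases hj : j < lines.length
    case neg =>
      rw [List.getElem?_eq_none (by rw [pvA_length]; omega),
        List.getElem?_eq_none (by rw [List.length_reverse, pvGrec_length, List.length_reverse]; omega)]
    case pos =>
      rw [pvA_getElem? lines hne hcl j,
        List.getElem?_reverse (by rw [pvGrec_length, List.length_reverse]; exact hj),
        pvGrec_length, List.length_reverse]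
      have ht : lines.length - 1 - j < lines.reverse.length := by
        rw [List.length_reverse]; omega
      rw [pvGrec_getElem? lines.reverse false (lines.length - 1 - j) ht]
      have hrt : lines.reverse[lines.length - 1 - j]'ht = lines[j]'hj := by
        rw [List.getElem_reverse]
        congr 1
        omega
      rw [hrt,
        show lines.reverse.take (lines.length - 1 - j) = (lines.drop (j+1)).reverse from by
          rw [List.take_reverse, show lines.length - (lines.length - 1 - j) = j + 1 by omega],
        List.any_reverse]
      cases hc : pvIsContent (lines[j]'hj)
      · have hjn : ((j : Int)) ∉ pvCL lines := by
          rw [pvCL_mem_iff]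
          rintro ⟨k, hk, hkeq, hck⟩
          have hjk : j = k := by exact_mod_cast hkeq
          subst hjk
          rw [hc] at hck
          exact absurd hck (by simp)
        rw [if_neg (fun h => hjn (by rw [h]; exact List.getLast_mem hcl)),
          if_neg (fun h => hjn ((List.dropLast_sublist _).mem h))]
        simp [List.getElem?_eq_getElem hj]
      · have hjm : (j : Int) ∈ pvCL lines := (pvCL_mem_iff _ _).mpr ⟨j, hj, rfl, hc⟩
        cases hP : (lines.drop (j+1)).any pvIsContent
        · have hjl : (j : Int) = (pvCL lines).getLast hcl := by
            obtain ⟨k, hk, hkeq, hck⟩ := (pvCL_mem_iff _ _).mp (List.getLast_mem hcl)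
            have hjk : (j : Int) ≤ (pvCL lines).getLast hcl := pvCL_le_getLast lines hcl _ hjm
            rw [hkeq] at hjk ⊢
            have hj_le_k : j ≤ k := by exact_mod_cast hjk
            rcases Nat.lt_or_ge j k with hlt | hge
            · exact absurd ((pvDropAny_iff lines j).mpr ⟨k, hk, hlt, hck⟩) (by simp [hP])
            · have : j = k := by omega
              exact_mod_cast congrArg (Nat.cast : Nat → Int) this
          rw [if_pos hjl]
          simp [List.getElem?_eq_getElem hj]
        · obtain ⟨k, hk, hjk, hck⟩ := (pvDropAny_iff lines j).mp hP
          have hkm : ((k : Int)) ∈ pvCL lines := (pvCL_mem_iff _ _).mpr ⟨k, hk, rfl, hck⟩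
          have hjlt : (j : Int) < (pvCL lines).getLast hcl :=
            lt_of_lt_of_le (by exact_mod_cast hjk) (pvCL_le_getLast lines hcl _ hkm)
          have h2 : (j : Int) ∈ (pvCL lines).dropLast := by
            have hsplit := List.dropLast_append_getLast hcl
            have hjm' := hjm
            rw [← hsplit] at hjm'
            rcases List.mem_append.mp hjm' with h | h
            · exact h
            · exact absurd (List.mem_singleton.mp h) (ne_of_lt hjlt)
          rw [if_neg (ne_of_lt hjlt), if_pos h2]
          simp [List.getElem?_eq_getElem hj]
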